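-- pv_equiv track=rewrite | github.com/feliciatrinh/coding-challenges-and-review | arrays/kDifference.py | bestPairs
-- ===== SOURCE A (Python) =====
-- def bestPairs(k, arr):
--     """
--     Puts each element of arr into a set. set.add() takes O(1) on average and O(n) worst case
--     so this step takes O(n) on average
--     Iterates through arr, checking if arr[i] is in that set in average O(n) time
--     checking for existence in the set takes average O(1) and worst case O(n) time
--     Worst case scenario would take O(n^2) time
--     """
--     if k == 0:
--         return 0
--     count = 0
--     arr_set = set()
--     for elem in arr:
--         arr_set.add(elem)
--     for elem in arr:
--         if elem + k in arr_set:
--             count += 1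
--     return count
-- ===== SOURCE B (Python) =====
-- def bestPairs(k, arr):
--     if k == 0:
--         return 0
--     s = sorted(arr)
--     n = len(s)
--     j = 0
--     count = 0
--     for x in s:
--         t = x + k
--         while j < n and s[j] < t:
--             j += 1
--         if j < n and s[j] == t:
--             count += 1
--     return count
-- ===== Notes on version B (the rewrite author's own statement) =====
-- stated objective: alternative
-- what changed: Replaces the hash-set membership pass with a sort plus a single monotonic pointer: B sorts a copy of arr and, scanning the sorted values, advances one pointer to locate x+k, counting matches without any set.
import Mathlib
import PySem

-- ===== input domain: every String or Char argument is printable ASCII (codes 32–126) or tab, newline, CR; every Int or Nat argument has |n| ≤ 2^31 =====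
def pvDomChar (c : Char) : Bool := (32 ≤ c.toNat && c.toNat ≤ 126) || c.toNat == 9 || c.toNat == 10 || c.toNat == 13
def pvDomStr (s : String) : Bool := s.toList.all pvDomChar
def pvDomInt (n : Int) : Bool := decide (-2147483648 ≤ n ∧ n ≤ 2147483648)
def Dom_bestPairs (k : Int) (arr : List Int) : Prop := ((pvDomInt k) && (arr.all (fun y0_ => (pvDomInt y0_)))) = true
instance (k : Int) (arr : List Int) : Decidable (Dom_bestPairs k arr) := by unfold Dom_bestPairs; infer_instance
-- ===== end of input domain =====

-- B replaces A's hash-set membership pass by sort + one monotonic pointer (alternative algorithm, no speed claim).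

-- ===== PORT A =====
def bestPairs (k : Int) (arr : List Int) : Int :=
  if k = 0 then 0
  else
    let arrSet : PySem.Set Int := arr.foldl (fun s e => PySem.Set.add s e) PySem.Set.empty
    arr.foldl (fun count elem => if PySem.Set.contains arrSet (elem + k) then count + 1 else count) 0

-- ===== PORT B =====
-- 'while j < n and s[j] < t: j += 1'
def bpAdvance (s : List Int) (t : Int) (j : Nat) : Nat :=
  if h : j < s.length then
    if s[j] < t then bpAdvance s t (j + 1) else j
  else j
termination_by s.length - j

-- one iteration of B's for-loop: state = (count, j)
def bpStep (s : List Int) (k : Int) (st : Int × Nat) (x : Int) : Int × Nat :=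
  let j := bpAdvance s (x + k) st.2
  (if h : j < s.length then (if s[j] = x + k then st.1 + 1 else st.1) else st.1, j)

def bestPairs_alt (k : Int) (arr : List Int) : Int :=
  if k = 0 then 0
  else
    let s := PySem.List.sorted arr (fun x => x) false
    (s.foldl (bpStep s k) ((0 : Int), (0 : Nat))).1

-- ===== PRECONDITION & SPEC =====
def Spec_bestPairs (k : Int) (arr : List Int) (out : Int) : Prop := out = bestPairs_alt k arr
instance (k : Int) (arr : List Int) (out : Int) : Decidable (Spec_bestPairs k arr out) := by unfold Spec_bestPairs; infer_instance

-- ===== CLAIM (what is proved, stated in full; the proofs are below) =====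
def Claim_equal_bestPairs : Prop := ∀ (k : Int) (arr : List Int), Dom_bestPairs k arr → Spec_bestPairs k arr (bestPairs k arr)

-- ===== LEMMAS AND PROOFS =====

-- everything strictly below the returned pointer is < t, provided that held below the start pointer
theorem bpAdvance_inv (s : List Int) (t : Int) (j : Nat)
    (hj : ∀ i (h : i < s.length), i < j → s[i] < t) :
    ∀ i (h : i < s.length), i < bpAdvance s t j → s[i] < t := by
  induction j using bpAdvance.induct (s := s) (t := t) with
  | case1 j h hlt ih =>
    have he : bpAdvance s t j = bpAdvance s t (j + 1) := by
      rw [bpAdvance]; rw [dif_pos h, if_pos hlt]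
    rw [he]
    exact ih (fun i hi hij => by rcases Nat.lt_succ_iff_lt_or_eq.mp hij with h' | h'
                                 · exact hj i hi h'
                                 · subst h'; exact hlt)
  | case2 j h hlt =>
    have he : bpAdvance s t j = j := by rw [bpAdvance]; rw [dif_pos h, if_neg hlt]
    rw [he]; exact hj
  | case3 j h =>
    have he : bpAdvance s t j = j := by rw [bpAdvance]; rw [dif_neg h]
    rw [he]; exact hj

-- the returned pointer does not point at an element < t
theorem bpAdvance_stop (s : List Int) (t : Int) (j : Nat) :
    ∀ h : bpAdvance s t j < s.length, ¬ s[bpAdvance s t j] < t := by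
  induction j using bpAdvance.induct (s := s) (t := t) with
  | case1 j h hlt ih =>
    have he : bpAdvance s t j = bpAdvance s t (j + 1) := by
      rw [bpAdvance]; rw [dif_pos h, if_pos hlt]
    simp only [he]; exact ih
  | case2 j h hlt =>
    have he : bpAdvance s t j = j := by rw [bpAdvance]; rw [dif_pos h, if_neg hlt]
    simp only [he]; intro _; exact hlt
  | case3 j h =>
    have he : bpAdvance s t j = j := by rw [bpAdvance]; rw [dif_neg h]
    simp only [he]; intro h'; exact absurd h' h

-- B's loop counts, per iterated element x, whether x+k occurs in the sorted list s
theorem bpLoop_spec (s : List Int) (k : Int)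
    (hmono : ∀ p q (hp : p < s.length) (hq : q < s.length), p ≤ q → s[p] ≤ s[q]) :
    ∀ (l : List Int) (c : Int) (j : Nat),
      l.Pairwise (· ≤ ·) →
      (∀ x ∈ l, ∀ i (h : i < s.length), i < j → s[i] < x + k) →
      (l.foldl (bpStep s k) (c, j)).1 = c + (l.countP (fun x => decide ((x + k) ∈ s)) : Int) := by
  intro l
  induction l with
  | nil => intro c j _ _; simp
  | cons x l ih =>
    intro c j hpw hinv
    have hpx : ∀ y ∈ l, x ≤ y := (List.pairwise_cons.mp hpw).1
    have hpw' : l.Pairwise (· ≤ ·) := (List.pairwise_cons.mp hpw).2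
    have inv0 : ∀ i (h : i < s.length), i < j → s[i] < x + k :=
      fun i h hij => hinv x (List.mem_cons_self) i h hij
    set j' := bpAdvance s (x + k) j with hj'
    have inv1 : ∀ i (h : i < s.length), i < j' → s[i] < x + k := bpAdvance_inv s (x + k) j inv0
    have hinv' : ∀ y ∈ l, ∀ i (h : i < s.length), i < j' → s[i] < y + k := by
      intro y hy i h hij
      exact lt_of_lt_of_le (inv1 i h hij) (by have := hpx y hy; omega)
    have hmem : (x + k ∈ s) ↔ (j' < s.length ∧ ∃ h : j' < s.length, s[j'] = x + k) := by
      constructor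
      · intro hm
        obtain ⟨m, hm', hsm⟩ := List.getElem_of_mem hm
        have hmge : ¬ m < j' := fun hc => absurd hsm (ne_of_lt (inv1 m hm' hc))
        have hjlt : j' < s.length := lt_of_le_of_lt (Nat.le_of_not_lt hmge) hm'
        refine ⟨hjlt, hjlt, le_antisymm ?_ ?_⟩
        · calc s[j'] ≤ s[m] := hmono j' m hjlt hm' (Nat.le_of_not_lt hmge)
            _ = x + k := hsm
        · exact le_of_not_gt (bpAdvance_stop s (x + k) j hjlt)
      · rintro ⟨hjlt, _, heq⟩; exact heq ▸ List.getElem_mem hjlt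
    have hstep : bpStep s k (c, j) x
        = ((if (x + k) ∈ s then c + 1 else c), j') := by
      unfold bpStep
      simp only [← hj']
      by_cases hjl : j' < s.length
      · rw [dif_pos hjl]
        by_cases heq : s[j'] = x + k
        · rw [if_pos heq, if_pos (hmem.mpr ⟨hjl, hjl, heq⟩)]
        · rw [if_neg heq, if_neg (fun hm => heq ((hmem.mp hm).2.choose_spec))]
      · rw [dif_neg hjl, if_neg (fun hm => hjl (hmem.mp hm).1)]
    rw [List.foldl_cons, hstep, ih _ _ hpw' hinv', List.countP_cons]
    by_cases hm : (x + k) ∈ s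
    · simp [hm]; ring
    · simp [hm]
  
-- A's value is the number of elements whose value+k occurs in arr
theorem bestPairs_eq_countP (k : Int) (arr : List Int) (hk : k ≠ 0) :
    bestPairs k arr = (arr.countP (fun e => decide ((e + k) ∈ arr)) : Int) := by
  unfold bestPairs
  rw [if_neg hk]
  have hset : arr.foldl (fun s e => PySem.Set.add s e) PySem.Set.empty = PySem.Set.ofList arr :=
    (PySem.Set.ofList_eq_foldl arr).symm
  simp only [hset]
  rw [PySem.List.foldl_if_add_one]
  have hc : List.countP (fun elem => PySem.Set.contains (PySem.Set.ofList arr) (elem + k)) arr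
      = List.countP (fun e => decide ((e + k) ∈ arr)) arr :=
    List.countP_congr (fun e _ => by
      simp [PySem.Set.contains_eq_listContains, PySem.Set.mem_ofList])
  rw [hc]; simp

-- ===== VERDICT (by name: the statement is the Claim_ definition above) =====
theorem bestPairs_spec : Claim_equal_bestPairs := by
  intro k arr _
  unfold Spec_bestPairs bestPairs_alt
  by_cases hk : k = 0
  · simp [bestPairs, hk]
  · rw [if_neg hk, bestPairs_eq_countP k arr hk]
    set s := PySem.List.sorted arr (fun x => x) false with hs
    have hperm : s.Perm arr := PySem.List.sorted_perm arr (fun x => x) false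
    have hmono : ∀ p q (hp : p < s.length) (hq : q < s.length), p ≤ q → s[p] ≤ s[q] := by
      intro p q hp hq hpq
      exact PySem.List.sorted_id_getElem_mono arr hpq hq
    have hpw : s.Pairwise (· ≤ ·) := PySem.List.sorted_pairwise arr (fun x => x)
    rw [bpLoop_spec s k hmono s 0 0 hpw (fun x _ i _ h => absurd h (Nat.not_lt_zero i))]
    have hc : List.countP (fun x => decide ((x + k) ∈ s)) s
        = List.countP (fun x => decide ((x + k) ∈ arr)) s :=
      List.countP_congr (fun x _ => by simp [hperm.mem_iff])
    rw [hc, hperm.countP_eq]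
    simp
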